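-- pv_equiv track=rewrite | github.com/lorselq/enochian_language_modeling | src/enochian_lm/root_extraction/utils/embeddings.py | select_definitions
-- ===== SOURCE A (Python) =====
-- def select_definitions(def_list, max_words: int = 75):
--     """Select definitions without exceeding ``max_words``."""
--
--     selected = []
--     total_words = 0
--
--     for definition in def_list:
--         bracket_index = definition.find(" [")
--         if bracket_index != -1:
--             word_slice = definition[:bracket_index]
--         else:
--             word_slice = definition
--
--         word_count = len(word_slice.split())
--         if total_words + word_count > max_words:
--             break
--
--         selected.append(definition)
--         total_words += word_count
--
--     return selected
-- ===== SOURCE B (Python) =====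
-- def _word_count(definition):
--     bracket_index = definition.find(" [")
--     if bracket_index != -1:
--         word_slice = definition[:bracket_index]
--     else:
--         word_slice = definition
--     return len(word_slice.split())
--
--
-- def select_definitions(def_list, max_words: int = 75):
--     """Select definitions without exceeding ``max_words``."""
--
--     totals = []
--     running = 0
--     for definition in def_list:
--         running += _word_count(definition)
--         totals.append(running)
--
--     cut = len(def_list)
--     for i, total in enumerate(totals):
--         if total > max_words:
--             cut = i
--             break
--
--     return def_list[:cut]
-- ===== Notes on version B (the rewrite author's own statement) =====
-- stated objective: alternative
-- what changed: A's single accumulate-and-break loop is replaced by a three-stage decomposition: map each definition to its word count and build running prefix totals, then scan for the first index whose total strictly exceeds max_words, and return the slice def_list[:cut].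
import Mathlib
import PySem

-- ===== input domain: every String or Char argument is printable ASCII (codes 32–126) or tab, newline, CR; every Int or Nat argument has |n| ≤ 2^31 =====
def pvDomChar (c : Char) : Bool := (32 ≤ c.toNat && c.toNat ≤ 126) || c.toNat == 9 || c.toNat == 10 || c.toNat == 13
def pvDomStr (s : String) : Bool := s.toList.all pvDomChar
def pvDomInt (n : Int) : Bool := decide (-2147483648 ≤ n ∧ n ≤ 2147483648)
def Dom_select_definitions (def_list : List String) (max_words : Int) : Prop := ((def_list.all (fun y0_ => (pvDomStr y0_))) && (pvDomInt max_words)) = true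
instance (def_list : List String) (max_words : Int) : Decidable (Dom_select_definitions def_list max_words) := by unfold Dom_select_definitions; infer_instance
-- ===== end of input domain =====

-- B replaces A's accumulate-and-break loop by: per-definition word counts, prefix totals, find first index exceeding max_words, slice.

-- ===== PORT A =====
-- the loop of A: carries (selected, total_words); 'break' returns the accumulator
def selGoA (def_list : List String) (max_words : Int) (total : Int) (selected : List String) : List String :=
  match def_list with
  | [] => selected
  | d :: rest =>
    let bracket_index := PySem.Str.find d " ["
    let word_slice := if bracket_index ≠ -1 then PySem.Str.slice d none (some bracket_index) else d
    let word_count : Int := (PySem.Str.split₀ word_slice).length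
    if total + word_count > max_words then selected
    else selGoA rest max_words (total + word_count) (selected ++ [d])

def select_definitions (def_list : List String) (max_words : Int) : List String :=
  selGoA def_list max_words 0 []

-- ===== PORT B =====
def wordCountB (definition : String) : Int :=
  let bracket_index := PySem.Str.find definition " ["
  let word_slice := if bracket_index ≠ -1 then PySem.Str.slice definition none (some bracket_index) else definition
  (PySem.Str.split₀ word_slice).length

-- running prefix totals of the word counts
def totalsB (counts : List Int) (running : Int) : List Int :=
  match counts with
  | [] => []
  | c :: rest => (running + c) :: totalsB rest (running + c)

-- first index whose total exceeds max_words; default len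
def cutB (totals : List Int) (max_words : Int) (i : Nat) (len : Nat) : Nat :=
  match totals with
  | [] => len
  | t :: rest => if t > max_words then i else cutB rest max_words (i + 1) len

def select_definitions_alt (def_list : List String) (max_words : Int) : List String :=
  let counts := def_list.map wordCountB
  let totals := totalsB counts 0
  let cut := cutB totals max_words 0 def_list.length
  def_list.take cut

-- ===== PRECONDITION & SPEC =====
def Spec_select_definitions (def_list : List String) (max_words : Int) (out : List String) : Prop := out = select_definitions_alt def_list max_words
instance (def_list : List String) (max_words : Int) (out : List String) : Decidable (Spec_select_definitions def_list max_words out) := by unfold Spec_select_definitions; infer_instance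

-- ===== CLAIM (what is proved, stated in full; the proofs are below) =====
def Claim_equal_select_definitions : Prop := ∀ (def_list : List String) (max_words : Int), Dom_select_definitions def_list max_words → Spec_select_definitions def_list max_words (select_definitions def_list max_words)

-- ===== LEMMAS AND PROOFS =====

-- cutB with its running index/length bookkeeping, expressed index-free
def simpleCut (totals : List Int) (max_words : Int) : Nat :=
  match totals with
  | [] => 0
  | t :: rest => if t > max_words then 0 else 1 + simpleCut rest max_words

theorem cutB_eq_simpleCut (totals : List Int) (max_words : Int) :
    ∀ i : Nat, cutB totals max_words i (i + totals.length) = i + simpleCut totals max_words := by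
  induction totals with
  | nil => intro i; simp [cutB, simpleCut]
  | cons t rest ih =>
    intro i
    simp only [cutB, simpleCut, List.length_cons]
    split
    · simp
    · have h := ih (i + 1)
      have : i + 1 + rest.length = i + (rest.length + 1) := by omega
      rw [← this, h]
      omega

theorem selGoA_eq (def_list : List String) (max_words : Int) :
    ∀ (total : Int) (selected : List String),
      selGoA def_list max_words total selected =
        selected ++ def_list.take (simpleCut (totalsB (def_list.map wordCountB) total) max_words) := by
  induction def_list with
  | nil => intro total selected; simp [selGoA, totalsB, simpleCut]
  | cons d rest ih =>
    intro total selected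
    simp only [selGoA, List.map_cons, totalsB, simpleCut, wordCountB]
    split <;> split <;> simp [ih, show ∀ n:Nat, 1 + n = n + 1 from fun n => Nat.add_comm 1 n, List.take_succ_cons]

-- ===== VERDICT (by name: the statement is the Claim_ definition above) =====
theorem select_definitions_spec : Claim_equal_select_definitions := by
  intro def_list max_words _
  unfold Spec_select_definitions select_definitions select_definitions_alt
  rw [selGoA_eq]
  have h := cutB_eq_simpleCut (totalsB (def_list.map wordCountB) 0) max_words 0
  have hlen : (totalsB (def_list.map wordCountB) 0).length = def_list.length := by
    have : ∀ (cs : List Int) (r : Int), (totalsB cs r).length = cs.length := by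
      intro cs; induction cs with
      | nil => intro r; simp [totalsB]
      | cons c rest ih => intro r; simp [totalsB, ih]
    simp [this]
  simp only [hlen] at h
  simp only [Nat.zero_add] at h
  simp [h]
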